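-- pv_equiv track=rewrite | github.com/ahostbr/DevTools | python/devtools_status_dashboard.py | format_dashboard
-- ===== SOURCE A (Python) =====
-- def format_dashboard(data: dict) -> list[str]:
--     lines: list[str] = []
--     lines.append("DEVTOOLS STATUS DASHBOARD")
--     lines.append("-" * 72)
--
--     if not data:
--         lines.append("No status data yet. Use --mode update to add entries.")
--         return lines
--
--     for plugin, steps in sorted(data.items()):
--         total = len(steps)
--         done = sum(1 for s in steps.values() if s == "done")
--         in_progress = sum(1 for s in steps.values() if s == "in_progress")
--         todo = sum(1 for s in steps.values() if s == "todo")
--         lines.append(f"{plugin}: done={done}, in_progress={in_progress}, todo={todo}, total={total}")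
--         for step, status in sorted(steps.items()):
--             lines.append(f"  - {step}: {status}")
--         lines.append("")
--
--     return lines
-- ===== SOURCE B (Python) =====
-- def format_dashboard(data: dict) -> list[str]:
--     def block(plugin, steps):
--         # one fused pass over the sorted items: tally and format together
--         # (correct because sorting only permutes the items, so counts are unchanged)
--         done = in_prog = todo = 0
--         detail = []
--         for step, status in sorted(steps.items()):
--             if status == "done":
--                 done += 1
--             elif status == "in_progress":
--                 in_prog += 1
--             elif status == "todo":
--                 todo += 1
--             detail.append(f"  - {step}: {status}")
--         head = f"{plugin}: done={done}, in_progress={in_prog}, todo={todo}, total={len(steps)}"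
--         return [head] + detail + [""]
--
--     out = ["DEVTOOLS STATUS DASHBOARD", "-" * 72]
--     if not data:
--         return out + ["No status data yet. Use --mode update to add entries."]
--     return out + [ln for p, s in sorted(data.items()) for ln in block(p, s)]
-- ===== Notes on version B (the rewrite author's own statement) =====
-- stated objective: alternative
-- what changed: Per plugin, one fused pass over the sorted step items computes the three status tallies and the detail lines together (an if/elif accumulator chain, correct since sorting only permutes the items), and the output is assembled as header plus a flattening comprehension over a per-plugin block helper, instead of A's three separate generator scans plus a second formatting loop mutating one running list.
import Mathlib
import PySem

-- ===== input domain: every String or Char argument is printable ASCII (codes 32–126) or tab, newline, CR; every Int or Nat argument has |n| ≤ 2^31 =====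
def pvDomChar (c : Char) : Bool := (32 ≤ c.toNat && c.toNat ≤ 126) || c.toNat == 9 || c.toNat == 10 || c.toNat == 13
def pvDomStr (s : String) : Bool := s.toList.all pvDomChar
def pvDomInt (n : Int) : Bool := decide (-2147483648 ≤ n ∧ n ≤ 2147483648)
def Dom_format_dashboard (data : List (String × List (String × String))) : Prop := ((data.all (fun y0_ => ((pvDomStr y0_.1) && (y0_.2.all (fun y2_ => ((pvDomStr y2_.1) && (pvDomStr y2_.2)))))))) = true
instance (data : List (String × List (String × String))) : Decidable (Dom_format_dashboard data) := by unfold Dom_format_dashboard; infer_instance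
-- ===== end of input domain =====

-- B computes, per plugin, the three status tallies and the detail lines in ONE fused pass
-- over the sorted items, and flattens per-plugin blocks after the header (objective: alternative).

-- "-" * 72
def pvDashRow : String := String.ofList (PySem.List.pyRepeat ['-'] 72)

-- ===== PORT A =====
def format_dashboard (data : List (String × List (String × String))) : List String :=
  let lines : List String := ["DEVTOOLS STATUS DASHBOARD", pvDashRow]
  if data.isEmpty then
    lines ++ ["No status data yet. Use --mode update to add entries."]
  else
    (PySem.List.sorted data (fun p => p.1) false).foldl (fun lines ps =>
      let plugin := ps.1
      let steps := ps.2
      let total : Int := (steps.length : Int)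
      let done : Int := (steps.map (·.2)).foldl (fun n s => if s == "done" then n + 1 else n) 0
      let in_progress : Int := (steps.map (·.2)).foldl (fun n s => if s == "in_progress" then n + 1 else n) 0
      let todo : Int := (steps.map (·.2)).foldl (fun n s => if s == "todo" then n + 1 else n) 0
      let lines := lines ++ [plugin ++ ": done=" ++ PySem.Int.toStr done ++ ", in_progress=" ++ PySem.Int.toStr in_progress ++ ", todo=" ++ PySem.Int.toStr todo ++ ", total=" ++ PySem.Int.toStr total]
      let lines := (PySem.List.sorted steps (fun p => p.1) false).foldl (fun ls st => ls ++ ["  - " ++ st.1 ++ ": " ++ st.2]) lines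
      lines ++ [""]) lines

-- ===== PORT B =====
-- the fused per-item update: tally by an if/elif chain, then append the detail line
def pvStepB (st : Int × Int × Int × List String) (sp : String × String) : Int × Int × Int × List String :=
  let c : Int × Int × Int :=
    if sp.2 == "done" then (st.1 + 1, st.2.1, st.2.2.1)
    else if sp.2 == "in_progress" then (st.1, st.2.1 + 1, st.2.2.1)
    else if sp.2 == "todo" then (st.1, st.2.1, st.2.2.1 + 1)
    else (st.1, st.2.1, st.2.2.1)
  (c.1, c.2.1, c.2.2, st.2.2.2 ++ ["  - " ++ sp.1 ++ ": " ++ sp.2])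

-- helper 'block' of Source B: summary head from the fused pass, then details, then blank
def pvBlockB (plugin : String) (steps : List (String × String)) : List String :=
  let r := (PySem.List.sorted steps (fun p => p.1) false).foldl pvStepB (0, 0, 0, [])
  let head := plugin ++ ": done=" ++ PySem.Int.toStr r.1 ++ ", in_progress=" ++ PySem.Int.toStr r.2.1 ++ ", todo=" ++ PySem.Int.toStr r.2.2.1 ++ ", total=" ++ PySem.Int.toStr ((steps.length : Int))
  [head] ++ r.2.2.2 ++ [""]

def format_dashboard_alt (data : List (String × List (String × String))) : List String :=
  let out : List String := ["DEVTOOLS STATUS DASHBOARD", pvDashRow]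
  if data.isEmpty then
    out ++ ["No status data yet. Use --mode update to add entries."]
  else
    out ++ (PySem.List.sorted data (fun p => p.1) false).flatMap (fun ps => pvBlockB ps.1 ps.2)

-- ===== PRECONDITION & SPEC =====
def Spec_format_dashboard (data : List (String × List (String × String))) (out : List String) : Prop := out = format_dashboard_alt data
instance (data : List (String × List (String × String))) (out : List String) : Decidable (Spec_format_dashboard data out) := by unfold Spec_format_dashboard; infer_instance

-- ===== CLAIM =====
def Claim_equal_format_dashboard : Prop := ∀ (data : List (String × List (String × String))), Dom_format_dashboard data → Spec_format_dashboard data (format_dashboard data)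

-- ===== LEMMAS AND PROOFS =====

-- counting by a conditional foldl is List.count
theorem pv_foldl_count (v : String) (l : List String) (init : Int) :
    l.foldl (fun n s => if s == v then n + 1 else n) init = init + (l.count v : Int) := by
  induction l generalizing init with
  | nil => simp
  | cons x t ih =>
    simp only [List.foldl_cons, ih, List.count_cons]
    by_cases hx : x == v
    · simp [hx]; ring
    · simp [hx]

-- the fused pass computes the three counts and the detail lines at once
theorem pv_fused (l : List (String × String)) (d ip td : Int) (acc : List String) :
    l.foldl pvStepB (d, ip, td, acc)
      = (d + ((l.map (·.2)).count "done" : Int),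
         ip + ((l.map (·.2)).count "in_progress" : Int),
         td + ((l.map (·.2)).count "todo" : Int),
         acc ++ l.map (fun sp => "  - " ++ sp.1 ++ ": " ++ sp.2)) := by
  induction l generalizing d ip td acc with
  | nil => simp
  | cons x t ih =>
    simp only [List.foldl_cons, List.map_cons, List.count_cons, pvStepB]
    by_cases h1 : x.2 == "done"
    · simp only [h1, if_true]; rw [ih]
      have : x.2 = "done" := by simpa using h1
      simp [this]; ring
    · by_cases h2 : x.2 == "in_progress"
      · simp only [h1, h2, if_true]; rw [ih]
        have e2 : x.2 = "in_progress" := by simpa using h2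
        have e1 : ¬ (x.2 = "done") := by simpa using h1
        simp [e2]; ring
      · by_cases h3 : x.2 == "todo"
        · simp only [h1, h2, h3, if_true]; rw [ih]
          have e3 : x.2 = "todo" := by simpa using h3
          have e1 : ¬ (x.2 = "done") := by simpa using h1
          have e2 : ¬ (x.2 = "in_progress") := by simpa using h2
          simp [e3]; ring
        · simp only [h1, h2, h3]; rw [ih]
          have e1 : ¬ (x.2 = "done") := by simpa using h1
          have e2 : ¬ (x.2 = "in_progress") := by simpa using h2
          have e3 : ¬ (x.2 = "todo") := by simpa using h3
          simp

-- counts over the sorted items equal counts over the original dict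
theorem pv_count_sorted (v : String) (steps : List (String × String)) :
    ((PySem.List.sorted steps (fun p => p.1) false).map (·.2)).count v
      = (steps.map (·.2)).count v :=
  ((PySem.List.sorted_perm steps (fun p => p.1) false).map (·.2)).count_eq v

-- A's per-plugin step appends exactly B's block head for that plugin
theorem pv_step (lines : List String) (ps : String × List (String × String)) :
    ((PySem.List.sorted ps.2 (fun p => p.1) false).foldl
        (fun ls st => ls ++ ["  - " ++ st.1 ++ ": " ++ st.2])
        (lines ++ [ps.1 ++ ": done=" ++ PySem.Int.toStr ((ps.2.map (·.2)).foldl (fun n s => if s == "done" then n + 1 else n) 0) ++ ", in_progress=" ++ PySem.Int.toStr ((ps.2.map (·.2)).foldl (fun n s => if s == "in_progress" then n + 1 else n) 0) ++ ", todo=" ++ PySem.Int.toStr ((ps.2.map (·.2)).foldl (fun n s => if s == "todo" then n + 1 else n) 0) ++ ", total=" ++ PySem.Int.toStr ((ps.2.length : Int))]))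
      ++ [""]
      = lines ++ pvBlockB ps.1 ps.2 := by
  obtain ⟨plugin, steps⟩ := ps
  rw [PySem.List.foldl_append_singleton_eq_map]
  simp only [pvBlockB, pv_fused, pv_foldl_count, pv_count_sorted, zero_add,
    List.append_nil, List.append_assoc, List.cons_append,
    List.nil_append]

-- A's outer loop equals init ++ B's recursive blocks
theorem pv_outer (xs : List (String × List (String × String))) (init : List String) :
    xs.foldl (fun lines ps =>
      ((PySem.List.sorted ps.2 (fun p => p.1) false).foldl
          (fun ls st => ls ++ ["  - " ++ st.1 ++ ": " ++ st.2])
          (lines ++ [ps.1 ++ ": done=" ++ PySem.Int.toStr ((ps.2.map (·.2)).foldl (fun n s => if s == "done" then n + 1 else n) 0) ++ ", in_progress=" ++ PySem.Int.toStr ((ps.2.map (·.2)).foldl (fun n s => if s == "in_progress" then n + 1 else n) 0) ++ ", todo=" ++ PySem.Int.toStr ((ps.2.map (·.2)).foldl (fun n s => if s == "todo" then n + 1 else n) 0) ++ ", total=" ++ PySem.Int.toStr ((ps.2.length : Int))]))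
        ++ [""]) init
      = init ++ xs.flatMap (fun ps => pvBlockB ps.1 ps.2) := by
  induction xs generalizing init with
  | nil => simp
  | cons p t ih =>
    rw [List.foldl_cons, pv_step, ih, List.flatMap_cons, List.append_assoc]

-- ===== VERDICT =====
theorem format_dashboard_spec : Claim_equal_format_dashboard := by
  intro data _
  unfold Spec_format_dashboard format_dashboard format_dashboard_alt
  by_cases h : data.isEmpty
  · simp only [h, if_pos]
  · simp only [h, Bool.false_eq_true, if_false]
    rw [pv_outer]
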